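-- pv_equiv track=rewrite | github.com/cakirtufan/SpecTwin | Source/AutoFDMNES/SimulationParamsDPG.py | _replace_block_value
-- ===== SOURCE A (Python) =====
-- def _replace_block_value(lines, keyword, new_value_line):
--     kw_lower = keyword.strip().lower()
--     out = []
--     i = 0
--     while i < len(lines):
--         out.append(lines[i])
--         if lines[i].strip().lower().startswith(kw_lower):
--             if i + 1 < len(lines):
--                 out.append(f"   {new_value_line}\n")  # keep 3-space indent
--                 i += 2
--                 continue
--         i += 1
--     return out
-- ===== SOURCE B (Python) =====
-- def _replace_block_value(lines, keyword, new_value_line):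
--     kw = keyword.strip().lower()
--     out = []
--     seg = lines
--     while True:
--         j = next((k for k, line in enumerate(seg)
--                   if line.strip().lower().startswith(kw)), None)
--         if j is None or j + 1 >= len(seg):
--             return out + seg
--         out += seg[:j + 1]
--         out.append(f"   {new_value_line}\n")
--         seg = seg[j + 2:]
-- ===== Notes on version B (the rewrite author's own statement) =====
-- stated objective: alternative
-- what changed: Instead of A's single index-lookahead pass (i += 2 to skip the old value line), B repeatedly searches for the next matching header with next()/enumerate, splices prefix + header + replacement onto the output, and restarts the search on the remaining suffix after the consumed value line.
import Mathlib
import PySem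

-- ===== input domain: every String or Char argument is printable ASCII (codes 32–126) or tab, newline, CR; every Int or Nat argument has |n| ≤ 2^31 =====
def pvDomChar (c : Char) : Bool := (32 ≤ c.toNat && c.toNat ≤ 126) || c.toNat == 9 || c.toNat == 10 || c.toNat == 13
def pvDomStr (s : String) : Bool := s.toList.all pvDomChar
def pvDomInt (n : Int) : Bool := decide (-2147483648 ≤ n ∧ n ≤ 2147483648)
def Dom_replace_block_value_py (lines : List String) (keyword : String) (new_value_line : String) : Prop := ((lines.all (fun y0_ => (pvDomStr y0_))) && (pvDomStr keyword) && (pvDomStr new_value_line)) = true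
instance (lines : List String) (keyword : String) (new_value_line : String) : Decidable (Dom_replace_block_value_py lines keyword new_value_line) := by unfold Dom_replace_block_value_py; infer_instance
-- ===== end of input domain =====

-- ===== PORT A =====
-- B replaces A's index-with-lookahead pass by repeated find-next-match + splice; same return value, objective: alternative.
-- A's while loop over index i, transliterated as recursion on the remaining suffix of `lines`
-- (the `i += 2; continue` branch drops the head of `rest` without examining it).
def pvALoop (kw repl : String) : List String → List String
  | [] => []
  | l :: rest =>
    if PySem.Str.startswith (PySem.Str.lower (PySem.Str.strip l)) kw then
      match rest with
      | [] => [l]                                  -- i + 1 < len(lines) fails: just i += 1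
      | _ :: rest' => l :: repl :: pvALoop kw repl rest'  -- append replacement, i += 2
    else l :: pvALoop kw repl rest

def replace_block_value_py (lines : List String) (keyword : String) (new_value_line : String) : List String :=
  let kw_lower := PySem.Str.lower (PySem.Str.strip keyword)
  pvALoop kw_lower ("   " ++ new_value_line ++ "\n") lines

-- ===== PORT B =====
-- the match predicate hoisted out of B's generator expression
def pvHit (kw : String) (l : String) : Bool :=
  PySem.Str.startswith (PySem.Str.lower (PySem.Str.strip l)) kw

-- B's outer while-loop: find the first matching header (next/enumerate → List.findIdx?),
-- splice `seg[:j+1]` plus the replacement onto the output, and recurse on `seg[j+2:]`.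
def pvBLoop (kw repl : String) (seg : List String) : List String :=
  match seg.findIdx? (pvHit kw) with
  | none => seg
  | some j =>
    if hj : j + 1 < seg.length then
      seg.take (j + 1) ++ [repl] ++ pvBLoop kw repl (seg.drop (j + 2))
    else seg
termination_by seg.length
decreasing_by simp; omega

def replace_block_value_py_alt (lines : List String) (keyword : String) (new_value_line : String) : List String :=
  let kw := PySem.Str.lower (PySem.Str.strip keyword)
  pvBLoop kw ("   " ++ new_value_line ++ "\n") lines

-- ===== PRECONDITION & SPEC =====
def Spec_replace_block_value_py (lines : List String) (keyword : String) (new_value_line : String) (out : List String) : Prop := out = replace_block_value_py_alt lines keyword new_value_line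
instance (lines : List String) (keyword : String) (new_value_line : String) (out : List String) : Decidable (Spec_replace_block_value_py lines keyword new_value_line out) := by unfold Spec_replace_block_value_py; infer_instance

-- ===== CLAIM (what is proved, stated in full; the proofs are below) =====
def Claim_equal_replace_block_value_py : Prop := ∀ (lines : List String) (keyword : String) (new_value_line : String), Dom_replace_block_value_py lines keyword new_value_line → Spec_replace_block_value_py lines keyword new_value_line (replace_block_value_py lines keyword new_value_line)

-- ===== LEMMAS AND PROOFS =====
-- B's find-and-splice recursion computes A's single pass, by strong induction on the segment.
theorem pvBLoop_eq_pvALoop (kw repl : String) (seg : List String) :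
    pvBLoop kw repl seg = pvALoop kw repl seg := by
  induction hn : seg.length using Nat.strong_induction_on generalizing seg with
  | _ n ih =>
  subst hn
  match seg with
  | [] => simp [pvBLoop, pvALoop]
  | l :: rest =>
    rw [pvBLoop]
    by_cases hp : PySem.Chars.startswith (PySem.Chars.lower (PySem.Chars.strip l.toList)) kw.toList = true
    · have hh : pvHit kw l = true := by simp [pvHit, hp]
      have hf : (l :: rest).findIdx? (pvHit kw) = some 0 := by
        simp [List.findIdx?_cons, hh]
      rw [hf]
      cases rest with
      | nil => simp [pvALoop, hp]
      | cons r rest' =>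
        have hj : (0 : Nat) + 1 < (l :: r :: rest').length := by simp
        simp only [hj, dif_pos]
        rw [pvALoop.eq_def]
        simp [hp, List.take, List.drop, ih rest'.length (by simp) rest' rfl]
    · have hh : pvHit kw l = false := by simp [pvHit, hp]
      have hf : (l :: rest).findIdx? (pvHit kw) =
          (rest.findIdx? (pvHit kw)).map (· + 1) := by
        simp [List.findIdx?_cons, hh]
      rw [hf]
      have hrec : pvBLoop kw repl rest = pvALoop kw repl rest :=
        ih rest.length (by simp) rest rfl
      have hA : pvALoop kw repl (l :: rest) = l :: pvALoop kw repl rest := by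
        rw [pvALoop.eq_def]
        simp [hp]
      cases hr : rest.findIdx? (pvHit kw) with
      | none =>
        have hB : pvBLoop kw repl rest = rest := by rw [pvBLoop, hr]
        simp [hA, ← hrec, hB]
      | some j =>
        by_cases hj : j + 1 < rest.length
        · have hj' : j + 1 + 1 < (l :: rest).length := by simp; omega
          simp only [Option.map_some, hj', dif_pos]
          have hB : pvBLoop kw repl rest =
              rest.take (j + 1) ++ [repl] ++ pvBLoop kw repl (rest.drop (j + 2)) := by
            rw [pvBLoop, hr]; simp [hj]
          rw [hA, ← hrec, hB]
          simp [List.take_succ_cons, List.drop_succ_cons]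
        · have hj' : ¬ (j + 1 + 1 < (l :: rest).length) := by simp; omega
          simp only [Option.map_some, hj', dif_neg, not_false_iff]
          have hB : pvBLoop kw repl rest = rest := by rw [pvBLoop, hr]; simp [hj]
          simp [hA, ← hrec, hB]

-- ===== VERDICT (by name: the statement is the Claim_ definition above) =====
theorem replace_block_value_py_spec : Claim_equal_replace_block_value_py := by
  intro lines keyword new_value_line _
  unfold Spec_replace_block_value_py replace_block_value_py replace_block_value_py_alt
  exact (pvBLoop_eq_pvALoop _ _ lines).symm
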